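-- pv_equiv track=rewrite | github.com/dmedelUOH/Ayudantia2 | ayudantia1.py | horasXmaquina
-- ===== SOURCE A (Python) =====
-- def horasXmaquina(semana):
--     horas_dic = dict()
--     for maquina in semana:
--         if maquina[0] in horas_dic:
--             #voy a sumar las horas
--             horas_dic[maquina[0]] += maquina[2]
--         else:
--             horas_dic[maquina[0]] = maquina[2]
--     return horas_dic
-- ===== SOURCE B (Python) =====
-- def horasXmaquina(semana):
--     claves = dict.fromkeys(m[0] for m in semana)
--     return {k: sum(m[2] for m in semana if m[0] == k) for k in claves}
-- ===== Notes on version B (the rewrite author's own statement) =====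
-- stated objective: alternative
-- what changed: Replaces A's single accumulating dict pass with a two-phase decomposition: first collect the distinct machine ids in first-occurrence order (dict.fromkeys), then build the result with a dict comprehension summing each key's hours over the records.
import Mathlib
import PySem

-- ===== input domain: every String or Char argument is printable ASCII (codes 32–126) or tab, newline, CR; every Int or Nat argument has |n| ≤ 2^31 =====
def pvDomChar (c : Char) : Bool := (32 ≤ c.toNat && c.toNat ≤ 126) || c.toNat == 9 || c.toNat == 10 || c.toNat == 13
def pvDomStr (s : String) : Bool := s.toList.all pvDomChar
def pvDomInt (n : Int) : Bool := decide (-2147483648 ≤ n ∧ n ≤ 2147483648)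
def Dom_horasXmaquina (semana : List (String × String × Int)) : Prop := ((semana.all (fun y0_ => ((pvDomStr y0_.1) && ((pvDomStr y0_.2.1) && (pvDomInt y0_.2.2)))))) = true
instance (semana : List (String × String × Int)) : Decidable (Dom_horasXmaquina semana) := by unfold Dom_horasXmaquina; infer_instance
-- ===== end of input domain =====

-- B replaces A's single accumulating dict pass with a distinct-keys phase followed by a per-key
-- summation pass (alternative decomposition; same results, same key order).

-- ===== PORT A =====
-- A: one pass; if the key is present add the hours, else insert them.
def horasXmaquina (semana : List (String × String × Int)) : List (String × Int) :=
  (semana.foldl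
    (fun horas_dic maquina =>
      if horas_dic.contains maquina.1 then
        horas_dic.modify maquina.1 0 (· + maquina.2.2)   -- horas_dic[m[0]] += m[2]
      else
        horas_dic.insert maquina.1 maquina.2.2)
    (PySem.Dict.empty : PySem.Dict String Int)).items

-- ===== PORT B =====
-- B: distinct keys in first-occurrence order (dict.fromkeys), then one sum per key.
def horasXmaquina_alt (semana : List (String × String × Int)) : List (String × Int) :=
  (PySem.List.dedup (semana.map (·.1))).map
    (fun k => (k, ((semana.filter (fun m => m.1 == k)).map (·.2.2)).sum))

-- ===== PRECONDITION & SPEC =====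
def Spec_horasXmaquina (semana : List (String × String × Int)) (out : List (String × Int)) : Prop := out = horasXmaquina_alt semana
instance (semana : List (String × String × Int)) (out : List (String × Int)) : Decidable (Spec_horasXmaquina semana out) := by unfold Spec_horasXmaquina; infer_instance

-- ===== CLAIM (what is proved, stated in full; the proofs are below) =====
def Claim_equal_horasXmaquina : Prop := ∀ (semana : List (String × String × Int)), Dom_horasXmaquina semana → Spec_horasXmaquina semana (horasXmaquina semana)

-- ===== LEMMAS AND PROOFS =====

-- A's branch 'if key present then += else =' is exactly d[k] = d.get(k, 0) + v.
theorem pvStepEqModify (d : PySem.Dict String Int) (m : String × String × Int) :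
    (if d.contains m.1 then d.modify m.1 0 (· + m.2.2) else d.insert m.1 m.2.2)
      = d.modify m.1 0 (· + m.2.2) := by
  by_cases h : d.contains m.1
  · simp [h]
  · simp only [Bool.not_eq_true] at h
    simp [h, PySem.Dict.modify, PySem.Dict.getD_of_not_contains d 0 h]

-- Each key's accumulated value in A's dict is the sum of that key's hours.
theorem pvGetDFold (l : List (String × String × Int)) (d : PySem.Dict String Int) (k : String) :
    (l.foldl (fun d m => d.modify m.1 0 (· + m.2.2)) d).getD k 0
      = d.getD k 0 + ((l.filter (fun m => m.1 == k)).map (·.2.2)).sum := by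
  induction l generalizing d with
  | nil => simp
  | cons m t ih =>
    simp only [List.foldl_cons, ih, PySem.Dict.getD_modify, List.filter_cons]
    by_cases h : m.1 = k
    · simp [h, add_assoc]
    · simp [h, Ne.symm h]

-- ===== VERDICT (by name: the statement is the Claim_ definition above) =====
theorem horasXmaquina_spec : Claim_equal_horasXmaquina := by
  intro semana _
  show _ = _
  unfold horasXmaquina horasXmaquina_alt
  have hstep : semana.foldl
      (fun horas_dic maquina =>
        if horas_dic.contains maquina.1 then
          horas_dic.modify maquina.1 0 (· + maquina.2.2)
        else
          horas_dic.insert maquina.1 maquina.2.2)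
      (PySem.Dict.empty : PySem.Dict String Int)
      = semana.foldl (fun d m => d.modify m.1 0 (· + m.2.2)) PySem.Dict.empty := by
    apply List.foldl_ext
    intro d m _
    exact pvStepEqModify d m
  rw [hstep]
  have hnd : (semana.foldl (fun d m => d.modify m.1 0 (· + m.2.2))
      (PySem.Dict.empty : PySem.Dict String Int)).keys.Nodup := by
    have := PySem.Dict.nodup_keys_foldl_modify_key semana (fun m => m.1) 0
      (fun _ m => (· + m.2.2)) PySem.Dict.empty (by simp)
    simpa using this
  rw [PySem.Dict.items_eq_map_keys _ hnd 0]
  have hkeys : (semana.foldl (fun d m => d.modify m.1 0 (· + m.2.2))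
      (PySem.Dict.empty : PySem.Dict String Int)).keys
      = PySem.List.dedup (semana.map (·.1)) := by
    have := PySem.Dict.keys_foldl_modify_key semana (fun m => m.1) 0
      (fun _ m => (· + m.2.2)) PySem.Dict.empty
    simpa [PySem.Set.update, PySem.List.dedup_eq_ofList, PySem.Set.ofList] using this
  rw [hkeys]
  apply List.map_congr_left
  intro k _
  simp [pvGetDFold semana PySem.Dict.empty k]
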